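-- pv_equiv track=rewrite | github.com/sharat-chandra/HECSP_NMRScore_P | calHcsp/splitmol2.py | splitNMR
-- ===== SOURCE A (Python) =====
-- import itertools
--
-- def isplit(iterable,splitters):
--     return [list(g) for k,g in itertools.groupby(iterable,lambda x:x in splitters) if not k]
--
-- def splitNMR(pdb):
--     """
--     Split each model in an NMR pdb file into its own pdb.
--     """
--     linerange=[]
--     to_strip = "ROOT"
--     for i in range(len(pdb)):
--         if to_strip not in pdb[i]:
--             linerange.append(i)
--         elif to_strip in pdb[i]:
--             linerange.append(i)
--             linerange.append('NAN')
--     newlinerange=isplit(linerange,('NAN',))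
--     return newlinerange
-- ===== SOURCE B (Python) =====
-- def splitNMR(pdb):
--     """
--     Split each model in an NMR pdb file into its own pdb.
--     """
--     result = []
--     current = []
--     for i, line in enumerate(pdb):
--         current.append(i)
--         if "ROOT" in line:
--             result.append(current)
--             current = []
--     if current:
--         result.append(current)
--     return result
-- ===== Notes on version B (the rewrite author's own statement) =====
-- stated objective: simpler
-- what changed: Builds the index groups directly in one enumerate loop with a current/result accumulator, removing the 'NAN' sentinel list and the itertools.groupby pass.
import Mathlib
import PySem

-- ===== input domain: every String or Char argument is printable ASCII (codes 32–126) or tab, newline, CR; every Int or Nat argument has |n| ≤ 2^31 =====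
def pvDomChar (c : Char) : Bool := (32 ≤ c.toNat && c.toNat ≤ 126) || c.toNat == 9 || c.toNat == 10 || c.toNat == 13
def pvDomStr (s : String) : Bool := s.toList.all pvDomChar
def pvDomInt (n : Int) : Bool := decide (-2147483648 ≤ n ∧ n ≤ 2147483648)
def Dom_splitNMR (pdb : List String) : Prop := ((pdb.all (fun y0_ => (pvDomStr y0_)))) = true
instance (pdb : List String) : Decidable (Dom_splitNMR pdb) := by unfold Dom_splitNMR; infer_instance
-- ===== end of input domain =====

-- B replaces A's 'NAN'-sentinel list + itertools.groupby pass by one direct loop with a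
-- current/result accumulator (objective: simpler). Same return value on every input.

-- ===== PORT A =====
-- A's heterogeneous list mixing ints and the sentinel 'NAN' is encoded as List (Option Int),
-- none = 'NAN'. isplit(iterable, ('NAN',)) via groupby = runs of non-sentinel elements,
-- empty runs dropped; ported as the accumulator recursion isplitA.
def isplitA : List (Option Int) → List Int → List (List Int)
  | [], cur => if cur = [] then [] else [cur]
  | none :: rest, cur => if cur = [] then isplitA rest [] else cur :: isplitA rest []
  | some x :: rest, cur => isplitA rest (cur ++ [x])

def splitNMR (pdb : List String) : List (List Int) :=
  let linerange := (PySem.List.pyRange 0 pdb.length 1).foldl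
    (fun acc i =>
      if ¬ PySem.Str.isIn "ROOT" (PySem.List.pyGetD pdb i "") then acc ++ [some i]
      else acc ++ [some i, none]) []
  isplitA linerange []

-- ===== PORT B =====
-- B's enumerate loop: 'current' accumulator; a finished group is emitted (cons) at each ROOT
-- line; the trailing non-empty 'current' is emitted at the end.
def altAux : List String → Int → List Int → List (List Int)
  | [], _, cur => if cur = [] then [] else [cur]
  | line :: rest, i, cur =>
      let cur' := cur ++ [i]
      if PySem.Str.isIn "ROOT" line then cur' :: altAux rest (i + 1) []
      else altAux rest (i + 1) cur'

def splitNMR_alt (pdb : List String) : List (List Int) :=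
  altAux pdb 0 []

-- ===== PRECONDITION & SPEC =====
def Spec_splitNMR (pdb : List String) (out : List (List Int)) : Prop := out = splitNMR_alt pdb
instance (pdb : List String) (out : List (List Int)) : Decidable (Spec_splitNMR pdb out) := by unfold Spec_splitNMR; infer_instance

-- ===== CLAIM =====
def Claim_equal_splitNMR : Prop := ∀ (pdb : List String), Dom_splitNMR pdb → Spec_splitNMR pdb (splitNMR pdb)

-- ===== LEMMAS AND PROOFS =====
-- Structural view of A's linerange: the sentinel-encoded list from position k on.
def lrFrom : List String → Int → List (Option Int)
  | [], _ => []
  | s :: rest, i =>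
      (if PySem.Str.isIn "ROOT" s then [some i, none] else [some i]) ++ lrFrom rest (i + 1)

lemma fold_eq_lrFrom (L : List String) :
    ∀ (tl : List String) (k : Nat), L.drop k = tl → ∀ (acc : List (Option Int)),
      (PySem.List.pyRange k L.length 1).foldl
        (fun acc i =>
          if ¬ PySem.Str.isIn "ROOT" (PySem.List.pyGetD L i "") then acc ++ [some i]
          else acc ++ [some i, none]) acc
      = acc ++ lrFrom tl k := by
  intro tl
  induction tl with
  | nil =>
      intro k hk acc
      have hlen : L.length ≤ k := by
        by_contra h
        have := List.drop_eq_nil_iff.mp hk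
        omega
      rw [PySem.List.pyRange_one_eq_nil (by exact_mod_cast hlen)]
      simp [lrFrom]
  | cons s rest ih =>
      intro k hk acc
      have hklt : k < L.length := by
        by_contra h
        have : L.drop k = [] := List.drop_eq_nil_iff.mpr (by omega)
        rw [this] at hk; exact absurd hk (by simp)
      have hget : L[k]'hklt = s := by
        have := List.getElem_cons_drop (as := L) hklt
        rw [hk] at this
        exact (List.cons_eq_cons.mp this.symm).1.symm
      have hdrop : L.drop (k + 1) = rest := by
        have := List.getElem_cons_drop (as := L) hklt
        rw [hk] at this
        exact (List.cons_eq_cons.mp this.symm).2.symm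
      rw [PySem.List.pyRange_one_cons (by exact_mod_cast hklt)]
      simp only [List.foldl_cons]
      have hgd : PySem.List.pyGetD L (k : Int) "" = s := by
        rw [PySem.List.pyGetD_natCast]
        simp [List.getD, List.getElem?_eq_getElem hklt, hget]
      rw [hgd]
      have hcast : ((k : Int) + 1) = ((k + 1 : Nat) : Int) := by push_cast; ring
      by_cases hroot : PySem.Str.isIn "ROOT" s
      · simp only [hroot, not_true, if_false]
        rw [hcast, ih (k + 1) hdrop, lrFrom, if_pos hroot]
        simp [← hcast]
      · simp only [hroot]
        rw [hcast, ih (k + 1) hdrop, lrFrom, if_neg hroot]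
        simp [← hcast]

lemma isplitA_lrFrom_eq_altAux :
    ∀ (tl : List String) (i : Int) (cur : List Int),
      isplitA (lrFrom tl i) cur = altAux tl i cur := by
  intro tl
  induction tl with
  | nil => intro i cur; simp [lrFrom, isplitA, altAux]
  | cons s rest ih =>
      intro i cur
      by_cases hroot : PySem.Str.isIn "ROOT" s
      · simp only [lrFrom, List.cons_append, List.nil_append, altAux, if_pos hroot]
        have hne : cur ++ [i] ≠ [] := by simp
        rw [isplitA, isplitA, if_neg hne, ih]
      · simp only [lrFrom, List.cons_append, List.nil_append, altAux, if_neg hroot]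
        rw [isplitA]
        exact ih _ _

-- ===== VERDICT =====
theorem splitNMR_spec : Claim_equal_splitNMR := by
  intro pdb _
  unfold Spec_splitNMR splitNMR splitNMR_alt
  rw [show ((0 : Int)) = ((0 : Nat) : Int) from rfl,
      fold_eq_lrFrom pdb pdb 0 (by simp)]
  simpa using isplitA_lrFrom_eq_altAux pdb 0 []
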